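-- pv_equiv track=rewrite | github.com/Bilal303-ai/Rule-Based-Text-Analysis | program.py | get_personal_pronouns
-- ===== SOURCE A (Python) =====
-- def get_personal_pronouns(tokens):
--   """
--   Find the count of personal pronouns
--   """
--   words = [token for token in tokens if token.isalpha()]
--   personal_pronouns = ['i', 'we', 'my', 'ours', 'us']
--
--   count = 0
--   for word in words:
--     if word.lower() in personal_pronouns:
--       count += 1
--   return count
-- ===== SOURCE B (Python) =====
-- def get_personal_pronouns(tokens):
--   """
--   Find the count of personal pronouns
--   """
--   counts = {}
--   for token in tokens:
--     if token.isalpha():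
--       w = token.lower()
--       counts[w] = counts.get(w, 0) + 1
--   return (counts.get('i', 0) + counts.get('we', 0) + counts.get('my', 0)
--           + counts.get('ours', 0) + counts.get('us', 0))
-- ===== Notes on version B (the rewrite author's own statement) =====
-- stated objective: alternative
-- what changed: B builds a frequency dictionary of lowercased alphabetic tokens in one pass and then sums the counts of the five fixed pronouns, instead of testing each word for membership in the pronoun list.
import Mathlib
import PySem

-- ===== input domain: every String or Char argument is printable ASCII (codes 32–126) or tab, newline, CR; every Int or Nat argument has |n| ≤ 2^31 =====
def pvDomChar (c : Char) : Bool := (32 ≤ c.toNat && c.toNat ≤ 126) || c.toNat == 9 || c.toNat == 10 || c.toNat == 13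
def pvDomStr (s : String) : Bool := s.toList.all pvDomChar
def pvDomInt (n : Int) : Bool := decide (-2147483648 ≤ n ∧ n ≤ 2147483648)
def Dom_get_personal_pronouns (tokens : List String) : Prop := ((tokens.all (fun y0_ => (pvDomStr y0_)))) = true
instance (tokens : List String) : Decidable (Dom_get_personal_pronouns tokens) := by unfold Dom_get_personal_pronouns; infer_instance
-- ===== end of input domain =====

-- B counts the lowercased alphabetic tokens into a dictionary once and sums the five pronoun entries, instead of A's per-word membership test; same O(n) cost, different traversal shape.


-- ===== PORT A =====
def get_personal_pronouns (tokens : List String) : Int :=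
  let words := tokens.filter (fun token => PySem.Str.strIsalpha token)
  let personal_pronouns := ["i", "we", "my", "ours", "us"]
  words.foldl (fun count word =>
    if personal_pronouns.contains (PySem.Str.lower word) then count + 1 else count) 0

-- ===== PORT B =====
def get_personal_pronouns_alt (tokens : List String) : Int :=
  let counts := tokens.foldl (fun d token =>
    if PySem.Str.strIsalpha token then
      let w := PySem.Str.lower token
      d.insert w (d.getD w 0 + 1)
    else d) PySem.Dict.empty
  counts.getD "i" 0 + counts.getD "we" 0 + counts.getD "my" 0
    + counts.getD "ours" 0 + counts.getD "us" 0

-- ===== PRECONDITION & SPEC =====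
def Spec_get_personal_pronouns (tokens : List String) (out : Int) : Prop := out = get_personal_pronouns_alt tokens
instance (tokens : List String) (out : Int) : Decidable (Spec_get_personal_pronouns tokens out) := by unfold Spec_get_personal_pronouns; infer_instance

-- ===== CLAIM (what is proved, stated in full; the proofs are below) =====
def Claim_equal_get_personal_pronouns : Prop := ∀ (tokens : List String), Dom_get_personal_pronouns tokens → Spec_get_personal_pronouns tokens (get_personal_pronouns tokens)

-- ===== LEMMAS AND PROOFS =====


-- the lowercased alphabetic words of the token list
def pvWords (tokens : List String) : List String :=
  (tokens.filter (fun t => PySem.Str.strIsalpha t)).map PySem.Str.lower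

-- the sum of the occurrence counts of the five pronouns
def pvS (ws : List String) : Int :=
  ((ws.count "i" + ws.count "we" + ws.count "my" + ws.count "ours" + ws.count "us" : Nat) : Int)

theorem pvS_cons (w : String) (ws : List String) :
    pvS (w :: ws) = pvS ws + (if ["i", "we", "my", "ours", "us"].contains w then 1 else 0) := by
  by_cases h : ["i", "we", "my", "ours", "us"].contains w
  · simp only [List.contains_eq_mem, decide_eq_true_eq,
      List.mem_cons, List.not_mem_nil, or_false] at h
    rcases h with h | h | h | h | h <;> subst h <;>
      simp [pvS] <;> ring
  · have h' : ∀ p ∈ ["i", "we", "my", "ours", "us"], w ≠ p := by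
      intro p hp he; exact h (by simp [List.contains_eq_mem, he ▸ hp])
    simp only [h]
    simp [pvS, (h' "i" (by simp)), (h' "we" (by simp)),
      (h' "my" (by simp)), (h' "ours" (by simp)), (h' "us" (by simp))]

theorem pvA_fold (words : List String) (c : Int) :
    words.foldl (fun count word =>
      if ["i", "we", "my", "ours", "us"].contains (PySem.Str.lower word) then count + 1
      else count) c = c + pvS (words.map PySem.Str.lower) := by
  induction words generalizing c with
  | nil => simp [pvS]
  | cons w ws ih =>
    simp only [List.foldl_cons, List.map_cons, ih, pvS_cons]
    split_ifs <;> ring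

theorem pvB_fold (tokens : List String) (d : PySem.Dict String Int) :
    tokens.foldl (fun d token =>
      if PySem.Str.strIsalpha token then
        let w := PySem.Str.lower token
        d.insert w (d.getD w 0 + 1)
      else d) d
    = (pvWords tokens).foldl (fun d w => d.insert w (d.getD w 0 + 1)) d := by
  induction tokens generalizing d with
  | nil => simp [pvWords]
  | cons t ts ih =>
    simp only [List.foldl_cons, ih, pvWords, List.filter_cons]
    split_ifs with h <;> simp

-- ===== VERDICT (by name: the statement is the Claim_ definition above) =====
theorem get_personal_pronouns_spec : Claim_equal_get_personal_pronouns := by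
  intro tokens _
  unfold Spec_get_personal_pronouns get_personal_pronouns get_personal_pronouns_alt
  simp only [pvB_fold, PySem.Dict.foldl_insert_getD_add_one_eq_counter,
    PySem.Dict.getD_counter, pvA_fold, pvWords]
  simp [pvS]
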